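-- pv_equiv track=rewrite | github.com/flopsqi/Vikulin_M.V | P8/8.1.py | is_divisible_by_its_digits
-- ===== SOURCE A (Python) =====
-- def is_divisible_by_its_digits(n):
--     original = n
--     while n > 0:
--         digit = n % 10
--         if digit == 0 or original % digit != 0:
--             return False
--         n //= 10
--     return True
-- ===== SOURCE B (Python) =====
-- def _gcd(a, b):
--     while b:
--         a, b = b, a % b
--     return a
--
-- def is_divisible_by_its_digits(n):
--     lcm = 1
--     m = n
--     while m > 0:
--         d = m % 10
--         if d == 0:
--             return False
--         lcm = lcm * d // _gcd(lcm, d)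
--         m //= 10
--     return n % lcm == 0
-- ===== Notes on version B (the rewrite author's own statement) =====
-- stated objective: alternative
-- what changed: B accumulates the least common multiple of the digits (via a hand-rolled Euclidean gcd) in one pass and performs a single final divisibility test of n by that lcm, instead of A's per-digit divisibility test inside the loop.
import Mathlib
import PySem

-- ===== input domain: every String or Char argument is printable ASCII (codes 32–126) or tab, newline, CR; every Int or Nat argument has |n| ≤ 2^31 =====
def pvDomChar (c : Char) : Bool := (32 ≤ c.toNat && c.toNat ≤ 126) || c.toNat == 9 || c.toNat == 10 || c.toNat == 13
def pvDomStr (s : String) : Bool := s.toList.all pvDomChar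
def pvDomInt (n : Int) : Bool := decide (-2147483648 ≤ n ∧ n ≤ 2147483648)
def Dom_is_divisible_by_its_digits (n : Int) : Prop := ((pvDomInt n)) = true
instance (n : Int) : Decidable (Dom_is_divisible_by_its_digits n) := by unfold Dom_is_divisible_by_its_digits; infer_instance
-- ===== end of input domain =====

-- B accumulates the lcm of the digits (hand-rolled Euclidean gcd) in one pass and makes a single final divisibility test of n by that lcm, instead of A's per-digit divisibility test; objective: alternative.


-- ===== PORT A =====
-- the while-loop of A: state is (original, n)
def pyLoopA (original n : Int) : Bool :=
  if _h : n > 0 then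
    let digit := PySem.Int.mod n 10
    if digit = 0 ∨ PySem.Int.mod original digit ≠ 0 then false
    else pyLoopA original (PySem.Int.floordiv n 10)
  else true
termination_by n.toNat
decreasing_by
  have h10 : PySem.Int.floordiv n 10 = n / 10 := PySem.Int.floordiv_eq_ediv_of_pos (by omega)
  have h1 := Int.mul_ediv_add_emod n 10
  have h2 : 0 ≤ n % 10 := Int.emod_nonneg n (by omega)
  have h3 : n % 10 < 10 := Int.emod_lt_of_pos n (by omega)
  rw [h10]; omega

def is_divisible_by_its_digits (n : Int) : Bool := pyLoopA n n

-- ===== PORT B =====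
-- Source B's _gcd: while b: a, b = b, a % b
def pyGcd (a b : Int) : Int :=
  if h : b ≠ 0 then pyGcd b (PySem.Int.mod a b) else a
termination_by b.natAbs
decreasing_by
  rcases lt_trichotomy b 0 with hb | hb | hb
  · have hbd := PySem.Int.mod_neg_bounds a hb
    omega
  · exact absurd hb h
  · have h1 := PySem.Int.mod_nonneg a hb
    have h2 := PySem.Int.mod_lt a hb
    omega

-- the while-loop of B: state is (lcm, m); n is the tested number
def pyLoopB (n lcm m : Int) : Bool :=
  if _h : m > 0 then
    let d := PySem.Int.mod m 10
    if d = 0 then false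
    else pyLoopB n (PySem.Int.floordiv (lcm * d) (pyGcd lcm d)) (PySem.Int.floordiv m 10)
  else decide (PySem.Int.mod n lcm = 0)
termination_by m.toNat
decreasing_by
  have h10 : PySem.Int.floordiv m 10 = m / 10 := PySem.Int.floordiv_eq_ediv_of_pos (by omega)
  have h1 := Int.mul_ediv_add_emod m 10
  have h2 : 0 ≤ m % 10 := Int.emod_nonneg m (by omega)
  have h3 : m % 10 < 10 := Int.emod_lt_of_pos m (by omega)
  rw [h10]; omega

def is_divisible_by_its_digits_alt (n : Int) : Bool := pyLoopB n 1 n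

-- ===== PRECONDITION & SPEC =====
def Spec_is_divisible_by_its_digits (n : Int) (out : Bool) : Prop := out = is_divisible_by_its_digits_alt n
instance (n : Int) (out : Bool) : Decidable (Spec_is_divisible_by_its_digits n out) := by unfold Spec_is_divisible_by_its_digits; infer_instance

-- ===== CLAIM =====
def Claim_equal_is_divisible_by_its_digits : Prop := ∀ (n : Int), Dom_is_divisible_by_its_digits n → Spec_is_divisible_by_its_digits n (is_divisible_by_its_digits n)

-- ===== LEMMAS AND PROOFS =====

theorem pyGcd_natCast : ∀ (b a : Nat), pyGcd (a : Int) (b : Int) = (Nat.gcd a b : Int) := by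
  intro b
  induction b using Nat.strong_induction_on with
  | _ b ih =>
    intro a
    by_cases hb : b = 0
    · subst hb
      rw [pyGcd]
      simp [Nat.gcd_comm]
    · rw [pyGcd, dif_pos (by exact_mod_cast hb)]
      have hmod : PySem.Int.mod (a : Int) (b : Int) = ((a % b : Nat) : Int) :=
        PySem.Int.mod_natCast a b
      rw [hmod, ih (a % b) (Nat.mod_lt _ (Nat.pos_of_ne_zero hb))]
      have : Nat.gcd b (a % b) = Nat.gcd a b := by
        rw [Nat.gcd_comm b (a % b), ← Nat.gcd_rec b a, Nat.gcd_comm]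
      rw [this]

theorem lcm_step (L d : Nat) (hL : 0 < L) (hd : 0 < d) :
    PySem.Int.floordiv ((L : Int) * (d : Int)) (pyGcd (L : Int) (d : Int)) = (Nat.lcm L d : Int) := by
  rw [pyGcd_natCast]
  have hg : 0 < Nat.gcd L d := Nat.gcd_pos_of_pos_left d hL
  rw [PySem.Int.floordiv_eq_ediv_of_pos (by exact_mod_cast hg)]
  have : (L : Int) * (d : Int) = ((L * d : Nat) : Int) := by push_cast; ring
  rw [this, Nat.lcm]
  exact (Int.natCast_div (L * d) (Nat.gcd L d)).symm

theorem loopB_eq_loopA (n : Int) :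
    ∀ (m L : Nat), 0 < L →
      pyLoopB n (L : Int) (m : Int) = (pyLoopA n (m : Int) && decide (PySem.Int.mod n (L : Int) = 0)) := by
  intro m
  induction m using Nat.strong_induction_on with
  | _ m ih =>
    intro L hL
    by_cases hm : m = 0
    · subst hm
      rw [pyLoopB, dif_neg (by omega), pyLoopA, dif_neg (by omega)]
      simp
    · have hmpos : (0 : Int) < (m : Int) := by exact_mod_cast Nat.pos_of_ne_zero hm
      have hmod : PySem.Int.mod ((m : Int)) 10 = ((m % 10 : Nat) : Int) :=
        PySem.Int.mod_natCast m 10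
      have hfd : PySem.Int.floordiv ((m : Int)) 10 = ((m / 10 : Nat) : Int) :=
        PySem.Int.floordiv_natCast m 10
      rw [pyLoopB, dif_pos hmpos, pyLoopA, dif_pos hmpos]
      simp only [hmod, hfd]
      by_cases hd0 : m % 10 = 0
      · rw [if_pos (by exact_mod_cast hd0), if_pos (Or.inl (by exact_mod_cast hd0))]
        simp
      · have hd : 0 < m % 10 := Nat.pos_of_ne_zero hd0
        rw [if_neg (by exact_mod_cast hd0)]
        rw [lcm_step L (m % 10) hL hd]
        have hlt : m / 10 < m := Nat.div_lt_self (Nat.pos_of_ne_zero hm) (by omega)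
        have hLpos : 0 < Nat.lcm L (m % 10) := Nat.lcm_pos hL hd
        rw [ih (m / 10) hlt (Nat.lcm L (m % 10)) hLpos]
        have hdvdL : PySem.Int.mod n (Nat.lcm L (m % 10) : Int) = 0 ↔
            ((L : Int) ∣ n ∧ ((m % 10 : Nat) : Int) ∣ n) := by
          rw [PySem.Int.mod_eq_zero_iff_dvd]
          constructor
          · intro h
            exact ⟨dvd_trans (by exact_mod_cast Nat.dvd_lcm_left L (m % 10)) h,
                   dvd_trans (by exact_mod_cast Nat.dvd_lcm_right L (m % 10)) h⟩
          · rintro ⟨h1, h2⟩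
            rcases h1 with ⟨c1, hc1⟩
            rcases h2 with ⟨c2, hc2⟩
            have : ((Nat.lcm L (m % 10) : Nat) : Int) ∣ n := by
              rw [Int.natCast_dvd]
              apply Nat.lcm_dvd
              · rw [← Int.natCast_dvd]; exact ⟨c1, hc1⟩
              · rw [← Int.natCast_dvd]; exact ⟨c2, hc2⟩
            exact this
        by_cases hnd : PySem.Int.mod n ((m % 10 : Nat) : Int) = 0
        · rw [if_neg (by push_neg; exact ⟨by exact_mod_cast hd0, hnd⟩)]
          have hdn : ((m % 10 : Nat) : Int) ∣ n := (PySem.Int.mod_eq_zero_iff_dvd n _).mp hnd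
          have : decide (PySem.Int.mod n (Nat.lcm L (m % 10) : Int) = 0)
               = decide (PySem.Int.mod n (L : Int) = 0) := by
            apply decide_eq_decide.mpr
            rw [hdvdL, PySem.Int.mod_eq_zero_iff_dvd]
            exact ⟨fun h => h.1, fun h => ⟨h, hdn⟩⟩
          rw [this]
        · rw [if_pos (Or.inr hnd)]
          have : decide (PySem.Int.mod n (Nat.lcm L (m % 10) : Int) = 0) = false := by
            simp only [decide_eq_false_iff_not]
            intro h
            exact hnd ((PySem.Int.mod_eq_zero_iff_dvd n _).mpr ((hdvdL.mp h).2))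
          rw [this]
          simp

-- ===== VERDICT =====
theorem is_divisible_by_its_digits_spec : Claim_equal_is_divisible_by_its_digits := by
  intro n _
  unfold Spec_is_divisible_by_its_digits is_divisible_by_its_digits is_divisible_by_its_digits_alt
  by_cases hn : n ≤ 0
  · rw [pyLoopA, dif_neg (by omega), pyLoopB, dif_neg (by omega)]
    simp
  · push_neg at hn
    have hcast : ((n.toNat : Int)) = n := Int.toNat_of_nonneg (by omega)
    have := loopB_eq_loopA n n.toNat 1 (by omega)
    rw [hcast, Nat.cast_one] at this
    rw [this]
    simp
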